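-- pv_equiv track=rewrite | github.com/BlitheBrandon/advent2020 | day06/day06.py | solution_part_two
-- ===== SOURCE A (Python) =====
-- def solution_part_two(inp):
--     """Count chars contained in everyone's yeses"""
--     groups = process_input(inp)
--     count = 0
--     for yes_answers in groups:
--         result = set(yes_answers[0])
--         for s in yes_answers[1:]:
--             result.intersection_update(s)
--         count += len(result)
--     return count
--
-- def process_input(inp):
--     """Split inp into list of lists, seperator is blank line"""
--     groups = []
--     tmp = []
--
--     for line in inp:
--         if not line:
--             groups.append(tmp)
--             tmp = []
--         else:
--             tmp.append(line)
--     return groups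
-- ===== SOURCE B (Python) =====
-- def solution_part_two(inp):
--     """Count chars contained in everyone's yeses"""
--     total = 0
--     counts = {}
--     n = 0
--     for line in inp:
--         if line:
--             for c in set(line):
--                 counts[c] = counts.get(c, 0) + 1
--             n += 1
--         else:
--             total += sum(1 for v in counts.values() if v == n)
--             counts = {}
--             n = 0
--     return total
-- ===== Notes on version B (the rewrite author's own statement) =====
-- stated objective: alternative
-- what changed: Single streaming pass over the lines with a per-group character-frequency dict (count chars whose tally equals the group's line count) instead of first materialising the group lists and then repeatedly intersecting sets.
import Mathlib
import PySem

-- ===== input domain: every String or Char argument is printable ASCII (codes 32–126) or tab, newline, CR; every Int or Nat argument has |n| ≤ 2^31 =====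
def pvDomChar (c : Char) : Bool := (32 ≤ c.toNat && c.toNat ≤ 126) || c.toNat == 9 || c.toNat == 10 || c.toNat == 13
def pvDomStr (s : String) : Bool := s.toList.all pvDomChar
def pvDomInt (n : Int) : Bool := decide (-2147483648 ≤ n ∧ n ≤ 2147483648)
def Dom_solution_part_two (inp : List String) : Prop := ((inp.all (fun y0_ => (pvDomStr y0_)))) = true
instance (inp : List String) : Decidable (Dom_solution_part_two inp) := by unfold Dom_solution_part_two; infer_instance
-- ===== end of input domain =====

-- B replaces A's group-list materialisation + repeated set intersection by one streaming pass
-- with a per-group character-frequency dict (chars whose tally equals the group's line count);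
-- objective: alternative structure, same asymptotic cost.

-- ===== PORT A =====
def process_input (inp : List String) : List (List String) :=
  (inp.foldl (fun (st : List (List String) × List String) line =>
      if line = "" then (st.1 ++ [st.2], ([] : List String))
      else (st.1, st.2 ++ [line])) ([], [])).1

def solution_part_two (inp : List String) : Int :=
  (process_input inp).foldl (fun count yes_answers =>
    count +
      match PySem.List.pyGet? yes_answers 0 with
      | none => 0   -- Python raises IndexError here; excluded by Pre_
      | some first =>
        PySem.Set.len ((PySem.List.slice yes_answers (some 1) none).foldl
          (fun r s => PySem.Set.inter r s.toList) (PySem.Set.ofList first.toList))) 0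

-- ===== PORT B =====
-- the inner 'for c in set(line)' loop of Source B
def pvAddLine (d : PySem.Dict Char Int) (line : String) : PySem.Dict Char Int :=
  (PySem.Set.ofList line.toList).foldl (fun d c => d.insert c (d.getD c 0 + 1)) d

-- 'sum(1 for v in counts.values() if v == n)' of Source B
def pvTally (d : PySem.Dict Char Int) (n : Int) : Int :=
  (((d.values).filter (fun v => v == n)).length : Int)

def solution_part_two_alt (inp : List String) : Int :=
  (inp.foldl (fun (st : Int × PySem.Dict Char Int × Int) line =>
      if line ≠ "" then (st.1, pvAddLine st.2.1 line, st.2.2 + 1)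
      else (st.1 + pvTally st.2.1 st.2.2, PySem.Dict.empty, 0))
    (0, PySem.Dict.empty, 0)).1

-- ===== PRECONDITION & SPEC =====
-- Pre_ excludes exactly the inputs with an empty group (a leading blank line or two consecutive
-- blank lines), on which A's 'yes_answers[0]' raises IndexError.
def Pre_solution_part_two (inp : List String) : Prop :=
  ∀ g ∈ (inp.splitOn "").dropLast, g ≠ []
instance (inp : List String) : Decidable (Pre_solution_part_two inp) := by
  unfold Pre_solution_part_two; infer_instance

def pvWitness_solution_part_two : List String := ["ab", "b", "", "c", ""]

def Spec_solution_part_two (inp : List String) (out : Int) : Prop := out = solution_part_two_alt inp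
instance (inp : List String) (out : Int) : Decidable (Spec_solution_part_two inp out) := by
  unfold Spec_solution_part_two; infer_instance

-- ===== CLAIM (what is proved, stated in full; the proofs are below) =====
def Claim_equal_solution_part_two : Prop := ∀ (inp : List String), Dom_solution_part_two inp → Pre_solution_part_two inp → Spec_solution_part_two inp (solution_part_two inp)

-- ===== LEMMAS AND PROOFS =====

-- counts after the lines of tmp have been tallied
def pvCounterOf (tmp : List String) : PySem.Dict Char Int :=
  tmp.foldl pvAddLine PySem.Dict.empty

-- B's contribution of one finished group
def pvGroupVal (g : List String) : Int :=
  pvTally (pvCounterOf g) (g.length : Int)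

-- the distinct characters of all lines of a group, line by line
def pvFlatChars (g : List String) : List Char :=
  g.flatMap (fun s => PySem.Set.ofList s.toList)

theorem pv_dropLast_modifyHead {α : Type} (f : α → α) (l : List α) :
    (l.modifyHead f).dropLast = l.dropLast.modifyHead f := by
  match l with
  | [] => rfl
  | [x] => rfl
  | x :: y :: t => simp [List.modifyHead, List.dropLast_cons_of_ne_nil]

theorem pv_modifyHead_fun_id {α : Type} (l : List α) : l.modifyHead (fun x => x) = l := by
  cases l <;> simp

theorem pv_splitOn_ne_nil (xs : List String) : xs.splitOn "" ≠ [] := by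
  unfold List.splitOn; exact List.splitOnP_ne_nil _ _

theorem pv_splitOn_cons (x : String) (xs : List String) :
    (x :: xs).splitOn "" =
      if x = "" then [] :: xs.splitOn "" else (xs.splitOn "").modifyHead (x :: ·) := by
  simp [List.splitOn, List.splitOnP_cons]

-- A's grouping fold, characterised by List.splitOn
theorem pv_groups_fold (inp : List String) (gs : List (List String)) (tmp : List String) :
    (inp.foldl (fun (st : List (List String) × List String) line =>
        if line = "" then (st.1 ++ [st.2], ([] : List String))
        else (st.1, st.2 ++ [line])) (gs, tmp)).1
      = gs ++ ((inp.splitOn "").dropLast.modifyHead (tmp ++ ·)) := by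
  induction inp generalizing gs tmp with
  | nil => simp
  | cons a rest ih =>
    by_cases ha : a = ""
    · subst ha
      simp only [List.foldl_cons]
      rw [if_pos trivial, ih, pv_splitOn_cons, if_pos rfl,
          List.dropLast_cons_of_ne_nil (pv_splitOn_ne_nil rest)]
      have hid : (fun x : List String => [] ++ x) = fun x => x := by funext x; simp
      rw [hid, pv_modifyHead_fun_id]
      simp [List.modifyHead]
    · simp only [List.foldl_cons]
      rw [if_neg ha, ih, pv_splitOn_cons, if_neg ha,
          pv_dropLast_modifyHead, List.modifyHead_modifyHead]
      have hfe : ((fun x => tmp ++ x) ∘ fun x => a :: x)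
          = fun x => (tmp ++ [a]) ++ x := by funext x; simp
      rw [hfe]

theorem pv_process_input_eq (inp : List String) :
    process_input inp = (inp.splitOn "").dropLast := by
  unfold process_input
  rw [pv_groups_fold]
  simp only [List.nil_append]
  exact pv_modifyHead_fun_id _

theorem pv_counterOf_concat (tmp : List String) (a : String) :
    pvCounterOf (tmp ++ [a]) = pvAddLine (pvCounterOf tmp) a := by
  simp [pvCounterOf]

-- B's streaming fold, characterised by List.splitOn
theorem pv_alt_fold (inp : List String) (total : Int) (tmp : List String) :
    (inp.foldl (fun (st : Int × PySem.Dict Char Int × Int) line =>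
        if line ≠ "" then (st.1, pvAddLine st.2.1 line, st.2.2 + 1)
        else (st.1 + pvTally st.2.1 st.2.2, PySem.Dict.empty, 0))
      (total, pvCounterOf tmp, (tmp.length : Int))).1
      = total + ((((inp.splitOn "").dropLast.modifyHead (tmp ++ ·)).map pvGroupVal).sum) := by
  induction inp generalizing total tmp with
  | nil => simp
  | cons a rest ih =>
    by_cases ha : a = ""
    · subst ha
      simp only [List.foldl_cons]
      rw [if_neg (by simp)]
      have hIH := ih (total + pvTally (pvCounterOf tmp) (tmp.length : Int)) []
      have e0 : pvCounterOf [] = PySem.Dict.empty := rfl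
      have hid : (fun x : List String => [] ++ x) = fun x => x := by funext x; simp
      rw [e0, hid, pv_modifyHead_fun_id] at hIH
      simp only [List.length_nil, Nat.cast_zero] at hIH
      rw [hIH, pv_splitOn_cons, if_pos rfl,
          List.dropLast_cons_of_ne_nil (pv_splitOn_ne_nil rest)]
      simp [List.modifyHead, pvGroupVal]
      ring
    · simp only [List.foldl_cons]
      rw [if_pos (by simp [ha])]
      have h1 : ((tmp.length : Int) + 1) = ((tmp ++ [a]).length : Int) := by simp
      rw [← pv_counterOf_concat, h1, ih, pv_splitOn_cons, if_neg ha,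
          pv_dropLast_modifyHead, List.modifyHead_modifyHead]
      have hfe : ((fun x => tmp ++ x) ∘ fun x => a :: x)
          = fun x => (tmp ++ [a]) ++ x := by funext x; simp
      rw [hfe]

-- the intersection loop of A is a single filter
theorem pv_inter_fold (rest : List String) (r : PySem.Set Char) :
    rest.foldl (fun r s => PySem.Set.inter r s.toList) r
      = r.filter (fun c => rest.all (fun s => s.toList.contains c)) := by
  induction rest generalizing r with
  | nil => simp
  | cons s rs ih =>
    rw [List.foldl_cons, ih]
    show (PySem.Set.inter r s.toList).filter _ = _
    simp only [PySem.Set.inter, List.filter_filter]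
    congr 1
    funext c
    simp [Bool.and_comm]

theorem pv_counterOf_eq_counter (g : List String) :
    pvCounterOf g = PySem.Dict.counter (pvFlatChars g) := by
  rw [← PySem.Dict.foldl_insert_getD_add_one_eq_counter, pvFlatChars, List.foldl_flatMap]
  rfl

theorem pv_count_flatChars (g : List String) (c : Char) :
    (pvFlatChars g).count c = g.countP (fun s => s.toList.contains c) := by
  induction g with
  | nil => rfl
  | cons s rs ih =>
    rw [pvFlatChars, List.flatMap_cons, List.count_append, ← pvFlatChars, ih,
        List.countP_cons]
    by_cases hc : c ∈ s.toList
    · rw [List.count_eq_one_of_mem (PySem.Set.nodup_ofList s.toList)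
          ((PySem.Set.mem_ofList _ _).2 hc)]
      simp [hc, Nat.add_comm]
    · have : List.count c (PySem.Set.ofList s.toList) = 0 := by
        rw [List.count_eq_zero]
        exact fun h => hc ((PySem.Set.mem_ofList _ _).1 h)
      simp [this, hc]

-- per nonempty group: A's intersection size = B's tally count
theorem pv_group_eq (first : String) (rest : List String) :
    PySem.Set.len (rest.foldl (fun r s => PySem.Set.inter r s.toList)
        (PySem.Set.ofList first.toList))
      = pvGroupVal (first :: rest) := by
  rw [pv_inter_fold, pvGroupVal, pv_counterOf_eq_counter, pvTally,
      PySem.Dict.values_eq_map_keys _ (PySem.Dict.nodup_keys_counter _) 0,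
      List.filter_map, List.length_map, PySem.Dict.keys_counter]
  rw [PySem.Set.len]
  congr 1
  apply List.Perm.length_eq
  rw [List.perm_ext_iff_of_nodup
        ((PySem.Set.nodup_ofList first.toList).filter _)
        ((PySem.Set.nodup_ofList (pvFlatChars (first :: rest))).filter _)]
  intro c
  simp only [List.mem_filter, PySem.Set.mem_ofList, Function.comp_apply,
    PySem.Dict.getD_counter, pv_count_flatChars]
  constructor
  · rintro ⟨hmem, hall⟩
    simp only [List.all_eq_true, List.contains_iff_mem] at hall
    have hcount : (first :: rest).countP (fun s => s.toList.contains c)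
        = (first :: rest).length := by
      rw [List.countP_eq_length]
      intro s hs
      rcases List.mem_cons.1 hs with h | h
      · subst h; exact List.contains_iff_mem.2 hmem
      · exact List.contains_iff_mem.2 (hall s h)
    constructor
    · exact List.mem_flatMap.2 ⟨first, List.mem_cons_self, (PySem.Set.mem_ofList _ _).2 hmem⟩
    · have h2 : ((pvFlatChars (first :: rest)).count c : Int)
          = ((first :: rest).length : Int) := by
        rw [pv_count_flatChars]; exact_mod_cast congrArg (Nat.cast : Nat → Int) hcount
      simp [pv_count_flatChars] at h2 ⊢
      exact_mod_cast h2
  · rintro ⟨-, hn⟩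
    have hcount : (first :: rest).countP (fun s => s.toList.contains c)
        = (first :: rest).length := by
      have h2 := beq_iff_eq.mp hn
      exact_mod_cast h2
    rw [List.countP_eq_length] at hcount
    refine ⟨List.contains_iff_mem.1 (hcount first List.mem_cons_self), ?_⟩
    simp only [List.all_eq_true]
    intro s hs
    exact hcount s (List.mem_cons_of_mem _ hs)

-- ===== VERDICT (by name: the statement is the Claim_ definition above) =====
theorem solution_part_two_spec : Claim_equal_solution_part_two := by
  intro inp _ hpre
  unfold Spec_solution_part_two
  unfold solution_part_two solution_part_two_alt
  rw [pv_process_input_eq, PySem.List.foldl_add]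
  have hB := pv_alt_fold inp 0 []
  have hid : (fun x : List String => [] ++ x) = fun x => x := by funext x; simp
  have e0 : pvCounterOf [] = PySem.Dict.empty := rfl
  rw [hid, pv_modifyHead_fun_id, e0] at hB
  simp only [List.length_nil, Nat.cast_zero] at hB
  rw [hB]
  congr 1
  apply congrArg List.sum
  apply List.map_congr_left
  intro g hg
  have hne : g ≠ [] := hpre g hg
  match g, hne with
  | first :: rest, _ =>
    have h0 : PySem.List.pyGet? (first :: rest) (0 : Int) = some first := by
      simp [PySem.List.pyGet?, PySem.List.pyIdx?]
    have h1 : PySem.List.slice (first :: rest) (some (1 : Int)) none = rest := by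
      rw [PySem.List.slice_from (first :: rest) (by norm_num)]
      simp
    rw [h0, h1]
    exact pv_group_eq first rest
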